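-- pv_equiv track=rewrite | github.com/LukeElliman/Sandbox | exam_practice/Samples/Sample 8/sample_8.py | double_letters
-- ===== SOURCE A (Python) =====
-- def double_letters(sentence):
--     """Double letters in a sentence"""
--     doubled_letters = ""
--     for i in range(len(sentence)):
--         if sentence[i] != " ":
--             for value in range(2):
--                 doubled_letters += sentence[i]
--         else:
--             doubled_letters += sentence[i]
--     return doubled_letters
-- ===== SOURCE B (Python) =====
-- def double_letters(sentence):
--     """Double letters in a sentence"""
--     words = sentence.split(" ")
--     return " ".join("".join(ch * 2 for ch in word) for word in words)
-- ===== Notes on version B (the rewrite author's own statement) =====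
-- stated objective: faster
-- what changed: Replaces the index loop with quadratic string += and a nested range(2) loop by single-space tokenization via str.split, per-token character doubling with a join comprehension, and one final join on the single-space separator.
import Mathlib
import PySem

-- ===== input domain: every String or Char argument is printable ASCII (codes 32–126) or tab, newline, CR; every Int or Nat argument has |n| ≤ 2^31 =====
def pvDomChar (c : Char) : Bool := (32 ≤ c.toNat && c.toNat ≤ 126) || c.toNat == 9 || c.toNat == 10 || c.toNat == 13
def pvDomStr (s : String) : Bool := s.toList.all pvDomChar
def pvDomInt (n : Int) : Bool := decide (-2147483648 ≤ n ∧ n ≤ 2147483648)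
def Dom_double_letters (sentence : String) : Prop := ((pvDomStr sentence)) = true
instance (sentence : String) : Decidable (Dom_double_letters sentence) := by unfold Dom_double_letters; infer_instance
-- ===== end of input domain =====

-- B tokenizes on the single-space separator, doubles characters per token and rejoins, avoiding quadratic string += (measured faster).


-- ===== PORT A =====
-- literal port: index loop over range(len(sentence)); non-space chars appended twice via the inner range(2) loop
def double_letters (sentence : String) : String :=
  String.mk ((PySem.List.pyRange 0 (PySem.Str.len sentence) 1).foldl
    (fun doubled i =>
      if PySem.List.pyGetD sentence.toList i ' ' ≠ ' ' then
        (PySem.List.pyRange 0 2 1).foldl (fun d _ => d ++ [PySem.List.pyGetD sentence.toList i ' ']) doubled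
      else doubled ++ [PySem.List.pyGetD sentence.toList i ' ']) [])

-- ===== PORT B =====
-- port of Source B: split(" "), double every char of each word with "".join, then " ".join
def double_letters_alt (sentence : String) : String :=
  String.mk (PySem.Chars.join [' ']
    ((PySem.Chars.splitOn sentence.toList [' ']).map
      (fun w => PySem.Chars.join [] (w.map (fun ch => [ch, ch])))))

-- ===== PRECONDITION & SPEC =====
def Spec_double_letters (sentence : String) (out : String) : Prop := out = double_letters_alt sentence
instance (sentence : String) (out : String) : Decidable (Spec_double_letters sentence out) := by unfold Spec_double_letters; infer_instance

-- ===== CLAIM (what is proved, stated in full; the proofs are below) =====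
def Claim_equal_double_letters : Prop := ∀ (sentence : String), Dom_double_letters sentence → Spec_double_letters sentence (double_letters sentence)

-- ===== LEMMAS AND PROOFS =====

-- the common value both ports compute, per character
def pvDup (c : Char) : List Char := if c = ' ' then [' '] else [c, c]

-- A's accumulator loop is a flatMap
theorem a_foldl_flatMap (cs : List Char) (acc : List Char) :
    cs.foldl (fun d c => if c ≠ ' ' then d ++ [c] ++ [c] else d ++ [c]) acc
      = acc ++ cs.flatMap pvDup := by
  induction cs generalizing acc with
  | nil => simp
  | cons c cs ih =>
    simp only [List.foldl_cons, ih, List.flatMap_cons, pvDup]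
    by_cases h : c = ' ' <;> simp [h]

-- doubling the chars of a word with "".join equals flatMap
theorem join_nil_dup (w : List Char) :
    PySem.Chars.join [] (w.map (fun ch => [ch, ch])) = w.flatMap (fun ch => [ch, ch]) := by
  induction w with
  | nil => simp [PySem.Chars.join, List.intercalate]
  | cons c w ih =>
    cases w with
    | nil => simp [PySem.Chars.join, List.intercalate]
    | cons d w =>
      simp only [List.map_cons, PySem.Chars.join_cons_cons] at *
      simp [ih]

-- one step of Mathlib's splitOn on a single separator
theorem splitOn_cons (sep c : Char) (cs : List Char) :
    (c :: cs).splitOn sep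
      = if c = sep then [] :: cs.splitOn sep else (cs.splitOn sep).modifyHead (c :: ·) := by
  simp [List.splitOn, List.splitOnP_cons]

-- unfolding steps of splitOn's fueled worker
theorem go_nil (sep : Char) (fuel : Nat) (cur : List Char) (acc : List (List Char)) :
    PySem.Chars.splitOn.go [sep] fuel [] cur acc = (cur.reverse :: acc).reverse := by
  rw [PySem.Chars.splitOn.go.eq_def]; cases fuel <;> simp

theorem go_sep (sep : Char) (fuel : Nat) (c : Char) (rest cur : List Char)
    (acc : List (List Char)) (hpre : [sep].isPrefixOf (c :: rest) = true) :
    PySem.Chars.splitOn.go [sep] (fuel + 1) (c :: rest) cur acc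
      = PySem.Chars.splitOn.go [sep] fuel (List.drop 1 (c :: rest)) [] (cur.reverse :: acc) := by
  rw [PySem.Chars.splitOn.go.eq_def]; simp [hpre]

theorem go_nonsep (sep : Char) (fuel : Nat) (c : Char) (rest cur : List Char)
    (acc : List (List Char)) (hpre : [sep].isPrefixOf (c :: rest) = false) :
    PySem.Chars.splitOn.go [sep] (fuel + 1) (c :: rest) cur acc
      = PySem.Chars.splitOn.go [sep] fuel rest (c :: cur) acc := by
  rw [PySem.Chars.splitOn.go.eq_def]; simp [hpre]

-- splitOn's fueled worker, characterised via Mathlib's List.splitOn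
theorem splitOn_go_eq (sep : Char) :
    ∀ (fuel : Nat) (l cur : List Char) (acc : List (List Char)), l.length ≤ fuel →
      PySem.Chars.splitOn.go [sep] fuel l cur acc
        = acc.reverse ++ (l.splitOn sep).modifyHead (cur.reverse ++ ·) := by
  intro fuel
  induction fuel with
  | zero =>
    intro l cur acc h
    have hl : l = [] := List.eq_nil_of_length_eq_zero (Nat.le_zero.mp h)
    subst hl
    simp [go_nil, List.splitOn_nil]
  | succ fuel ih =>
    intro l cur acc h
    cases l with
    | nil => simp [go_nil, List.splitOn_nil]
    | cons c rest =>
      simp only [List.length_cons, Nat.succ_le_succ_iff] at h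
      by_cases hc : c = sep
      · subst hc
        rw [go_sep _ _ _ _ _ _ (by simp [List.isPrefixOf]), List.drop_one, List.tail_cons,
          ih _ _ _ h, splitOn_cons, if_pos rfl]
        cases List.splitOn c rest <;> simp
      · rw [go_nonsep _ _ _ _ _ _ (by simp [List.isPrefixOf, Ne.symm hc]),
          ih _ _ _ h, splitOn_cons, if_neg hc]
        obtain ⟨w, ws, hws⟩ := List.exists_cons_of_ne_nil
          (List.splitOnP_ne_nil (fun x => x == sep) rest)
        have hws' : rest.splitOn sep = w :: ws := hws
        simp [hws']

theorem splitOn_eq (cs : List Char) (sep : Char) :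
    PySem.Chars.splitOn cs [sep] = cs.splitOn sep := by
  rw [show PySem.Chars.splitOn cs [sep]
      = PySem.Chars.splitOn.go [sep] (cs.length + 1) cs [] [] from rfl,
    splitOn_go_eq sep _ _ _ _ (Nat.le_succ _)]
  obtain ⟨w, ws, hws⟩ := List.exists_cons_of_ne_nil
    (List.splitOnP_ne_nil (fun x => x == sep) cs)
  have hws' : cs.splitOn sep = w :: ws := hws
  simp [hws']

-- joining the doubled tokens back with " " is the same flatMap A computes
theorem b_eq_flatMap (cs : List Char) :
    PySem.Chars.join [' ']
        ((PySem.Chars.splitOn cs [' ']).map (fun w => PySem.Chars.join [] (w.map (fun ch => [ch, ch]))))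
      = cs.flatMap pvDup := by
  rw [splitOn_eq]
  induction cs with
  | nil =>
    simp only [List.splitOn_nil, List.map_cons, List.map_nil,
      PySem.Chars.join_singleton, PySem.Chars.join_nil, List.flatMap_nil]
  | cons c cs ih =>
    obtain ⟨w, ws, hws⟩ := List.exists_cons_of_ne_nil
      (List.splitOnP_ne_nil (fun x => x == ' ') cs)
    have hws' : cs.splitOn ' ' = w :: ws := hws
    rw [hws'] at ih
    by_cases hc : c = ' '
    · subst hc
      rw [splitOn_cons, if_pos rfl, hws', List.flatMap_cons, ← ih]
      simp only [List.map_cons, PySem.Chars.join_cons_cons, pvDup]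
      simp
    · rw [splitOn_cons, if_neg hc, hws', List.modifyHead_cons, List.flatMap_cons]
      cases ws with
      | nil =>
        simp only [List.map_cons, List.map_nil, PySem.Chars.join_singleton,
          join_nil_dup, List.flatMap_cons] at ih ⊢
        simp [pvDup, hc, ih]
      | cons w' ws' =>
        simp only [List.map_cons, PySem.Chars.join_cons_cons,
          join_nil_dup, List.flatMap_cons] at ih ⊢
        rw [← ih]
        simp [pvDup, hc, List.append_assoc]

theorem pyRange_two : PySem.List.pyRange 0 2 1 = [0, 1] := by decide

-- ===== VERDICT (by name: the statement is the Claim_ definition above) =====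
theorem double_letters_spec : Claim_equal_double_letters := by
  intro sentence _
  unfold Spec_double_letters double_letters double_letters_alt
  rw [b_eq_flatMap]
  congr 1
  have h1 : PySem.Str.len sentence = ((sentence.toList.length : Nat) : Int) := rfl
  rw [h1, PySem.List.foldl_pyRange_zero_pyGetD' sentence.toList ' '
    (fun d c => if c ≠ ' ' then (PySem.List.pyRange 0 2 1).foldl (fun d _ => d ++ [c]) d else d ++ [c]) []]
  have ha := a_foldl_flatMap sentence.toList []
  rw [List.nil_append] at ha
  rw [← ha]
  simp only [pyRange_two, List.foldl_cons, List.foldl_nil]
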